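-- pv_equiv track=rewrite | github.com/snehal1508/google-foobar | Level 2/dont-get-invloved.py | solution
-- ===== SOURCE A (Python) =====
-- def solution(src, dest):
--
--     count = []
--     for i in range(15):
--         li = []
--
--         if i==0 or i==14:
--             li = [6,5,4,5,4,5,4,5,4,5,4,5,4,5,6]
--
--         if i==1 or i==13:
--             li = [5,4,5,4,3,4,3,4,3,4,3,4,5,4,5]
--
--         if i==2 or i==12:
--             li = [4,5,4,3,4,3,4,3,4,3,4,3,4,5,4]
--
--         if i==3 or i==11:
--             li = [5,4,3,4,3,2,3,2,3,2,3,4,3,4,5]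
--
--         if i==4 or i==10:
--             li = [4,3,4,3,2,3,2,3,2,3,2,3,4,3,4]
--
--         if i==5 or i==9:
--             li = [5,4,3,2,3,4,1,2,1,4,3,2,3,4,5]
--
--         if i==6 or i==8:
--             li = [4,3,4,3,2,1,2,3,2,1,2,3,4,3,4]
--
--         if i==7:
--             li = [5,4,3,2,3,2,3,0,3,2,3,2,3,4,5]
--         count.append(li)
--
--     chessBoard , k = [], 0
--     for i in range(8):
--         li = [j for j in range(k, k+8)]
--         k+=8
--         chessBoard.append(li)
--
--     cnt1 = [x for x in chessBoard if src in x][0]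
--     cnt2 = [y for y in chessBoard if dest in y][0]
--
--     dist_x = 7 + (chessBoard.index(cnt2) - chessBoard.index(cnt1))
--     dist_y = 7 + (cnt2.index(dest) - cnt1.index(src))
--
--     return count[dist_x][dist_y]
-- ===== SOURCE B (Python) =====
-- def solution(src, dest):
--     # bitboard BFS: expand the set of reachable squares by one knight move per round
--     def attacks(b):
--         l1 = (b >> 1) & 0x7f7f7f7f7f7f7f7f
--         l2 = (b >> 2) & 0x3f3f3f3f3f3f3f3f
--         r1 = (b << 1) & 0xfefefefefefefefe
--         r2 = (b << 2) & 0xfcfcfcfcfcfcfcfc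
--         h1 = l1 | r1
--         h2 = l2 | r2
--         return ((h1 << 16) | (h1 >> 16) | (h2 << 8) | (h2 >> 8)) & 0xffffffffffffffff
--
--     reach = 1 << src
--     dist = 0
--     while not (reach >> dest) & 1:
--         reach |= attacks(reach)
--         dist += 1
--     return dist
-- ===== Notes on version B (the rewrite author's own statement) =====
-- stated objective: alternative
-- what changed: Replaces the hard-coded 15x15 displacement-distance table and index arithmetic with a bitboard BFS: the set of reachable squares is a 64-bit mask expanded each round by the classic knight-attack shift/mask computation until the destination bit is set.
-- intended difference: When src and dest are a corner square and its diagonal neighbour (the 8 ordered pairs from {0,9},{7,14},{56,49},{63,54}), A returns 2, the unbounded-board distance from its displacement table, but B returns the true 8x8-board knight distance 4, which is the intended value since both 2-move paths leave the board. — e.g. on solution(0, 9): A returns 2, B returns 4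
import Mathlib
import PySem

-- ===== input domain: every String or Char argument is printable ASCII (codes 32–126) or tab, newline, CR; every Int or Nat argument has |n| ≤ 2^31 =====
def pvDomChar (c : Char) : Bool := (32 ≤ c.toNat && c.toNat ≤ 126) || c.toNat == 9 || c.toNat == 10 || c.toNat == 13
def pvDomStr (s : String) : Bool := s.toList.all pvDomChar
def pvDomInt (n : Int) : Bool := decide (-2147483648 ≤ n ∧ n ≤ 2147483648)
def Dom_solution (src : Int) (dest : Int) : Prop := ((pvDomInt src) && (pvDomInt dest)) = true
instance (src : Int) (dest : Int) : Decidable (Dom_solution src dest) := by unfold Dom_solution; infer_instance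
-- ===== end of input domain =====

-- B replaces A's hard-coded 15x15 displacement table with a bitboard BFS (expanding the
-- reachable-square bitmask by the classic knight-attack shifts); on the 8 corner-diagonal
-- pairs (D_) B returns the true board distance 4 where A's table gives 2.


-- ===== PORT A =====
def solution (src : Int) (dest : Int) : Int :=
  -- the for-loop building `count`: each `if` overwrites li, the last matching one wins
  let count : List (List Int) := (PySem.List.pyRange 0 15 1).foldl (fun count i =>
    let li : List Int := []
    let li := if i == 0 || i == 14 then [6,5,4,5,4,5,4,5,4,5,4,5,4,5,6] else li
    let li := if i == 1 || i == 13 then [5,4,5,4,3,4,3,4,3,4,3,4,5,4,5] else li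
    let li := if i == 2 || i == 12 then [4,5,4,3,4,3,4,3,4,3,4,3,4,5,4] else li
    let li := if i == 3 || i == 11 then [5,4,3,4,3,2,3,2,3,2,3,4,3,4,5] else li
    let li := if i == 4 || i == 10 then [4,3,4,3,2,3,2,3,2,3,2,3,4,3,4] else li
    let li := if i == 5 || i == 9  then [5,4,3,2,3,4,1,2,1,4,3,2,3,4,5] else li
    let li := if i == 6 || i == 8  then [4,3,4,3,2,1,2,3,2,1,2,3,4,3,4] else li
    let li := if i == 7 then [5,4,3,2,3,2,3,0,3,2,3,2,3,4,5] else li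
    count ++ [li]) []
  -- the for-loop building chessBoard together with k
  let cbk : List (List Int) × Int := (PySem.List.pyRange 0 8 1).foldl (fun (p : List (List Int) × Int) _ =>
    let li := PySem.List.pyRange p.2 (p.2 + 8) 1
    (p.1 ++ [li], p.2 + 8)) ([], 0)
  let chessBoard := cbk.1
  -- [x for x in chessBoard if src in x][0] — IndexError (excluded by Pre_) when the filter is empty
  let cnt1 := (PySem.List.pyGet? (chessBoard.filter (fun x => x.contains src)) 0).getD []
  let cnt2 := (PySem.List.pyGet? (chessBoard.filter (fun y => y.contains dest)) 0).getD []
  let dist_x : Int := 7 + (((PySem.List.index? chessBoard cnt2).getD 0 : Nat) - ((PySem.List.index? chessBoard cnt1).getD 0 : Nat) : Int)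
  let dist_y : Int := 7 + (((PySem.List.index? cnt2 dest).getD 0 : Nat) - ((PySem.List.index? cnt1 src).getD 0 : Nat) : Int)
  (PySem.List.pyGet? ((PySem.List.pyGet? count dist_x).getD []) dist_y).getD 0

-- ===== PORT B =====
-- the classic bitboard knight-attack computation: every set bit expanded by all 8 moves
def knightAttacks (b : Int) : Int :=
  let l1 := PySem.Int.band (b >>> 1) 0x7f7f7f7f7f7f7f7f
  let l2 := PySem.Int.band (b >>> 2) 0x3f3f3f3f3f3f3f3f
  let r1 := PySem.Int.band (b <<< 1) 0xfefefefefefefefe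
  let r2 := PySem.Int.band (b <<< 2) 0xfcfcfcfcfcfcfcfc
  let h1 := PySem.Int.bor l1 r1
  let h2 := PySem.Int.bor l2 r2
  PySem.Int.band (PySem.Int.bor (PySem.Int.bor (h1 <<< 16) (h1 >>> 16))
    (PySem.Int.bor (h2 <<< 8) (h2 >>> 8))) 0xffffffffffffffff

-- the while-loop, with fuel 7: the knight's distance on the 8x8 board is at most 6,
-- so within Pre_ the fuel is never exhausted and the loop is exact
def reachLoop : Nat → Int → Int → Int → Int
  | 0, _, dist, _ => dist
  | fuel + 1, reach, dist, dest =>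
    if PySem.Int.band (reach >>> dest.toNat) 1 ≠ 0 then dist
    else reachLoop fuel (PySem.Int.bor reach (knightAttacks reach)) (dist + 1) dest

def solution_alt (src : Int) (dest : Int) : Int :=
  -- 'dest.toNat' / 'src.toNat': exact for the nonnegative shifts admitted by Pre_
  reachLoop 7 ((1 : Int) <<< src.toNat) 0 dest

-- ===== PRECONDITION & SPEC =====
-- A raises IndexError ([...][0] on an empty filter) unless both squares lie on the board
def Pre_solution (src : Int) (dest : Int) : Prop :=
  0 ≤ src ∧ src < 64 ∧ 0 ≤ dest ∧ dest < 64
instance (src : Int) (dest : Int) : Decidable (Pre_solution src dest) := by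
  unfold Pre_solution; infer_instance

def pvWitness_solution : Int × Int := (12, 34)

-- When src and dest are a corner square and its diagonal neighbour, A returns 2 (the
-- unbounded-board value of its displacement table) but the true 8x8 knight distance,
-- which B's BFS returns, is 4, since both 2-move paths leave the board.
def D_solution (src : Int) (dest : Int) : Prop :=
  (src, dest) ∈ ([(0, 9), (9, 0), (7, 14), (14, 7), (56, 49), (49, 56), (63, 54), (54, 63)] : List (Int × Int))
instance (src : Int) (dest : Int) : Decidable (D_solution src dest) := by
  unfold D_solution; infer_instance

def Spec_solution (src : Int) (dest : Int) (out : Int) : Prop :=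
  ¬ D_solution src dest → out = solution_alt src dest
instance (src : Int) (dest : Int) (out : Int) : Decidable (Spec_solution src dest out) := by
  unfold Spec_solution; infer_instance

def pvDiffWitness_solution : Int × Int := (0, 9)
def pvDiffWitnessOut_solution : Int × Int := (2, 4)

-- ===== CLAIM (what is proved, stated in full; the proofs are below) =====
def Claim_unchanged_solution : Prop := ∀ (src : Int) (dest : Int), Dom_solution src dest → Pre_solution src dest → Spec_solution src dest (solution src dest)
def Claim_changed_solution : Prop := Dom_solution (pvDiffWitness_solution.1) (pvDiffWitness_solution.2) ∧ Pre_solution (pvDiffWitness_solution.1) (pvDiffWitness_solution.2) ∧ D_solution (pvDiffWitness_solution.1) (pvDiffWitness_solution.2) ∧ solution (pvDiffWitness_solution.1) (pvDiffWitness_solution.2) = pvDiffWitnessOut_solution.1 ∧ solution_alt (pvDiffWitness_solution.1) (pvDiffWitness_solution.2) = pvDiffWitnessOut_solution.2 ∧ pvDiffWitnessOut_solution.1 ≠ pvDiffWitnessOut_solution.2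
def Claim_exact_solution : Prop := ∀ (src : Int) (dest : Int), Dom_solution src dest → Pre_solution src dest → D_solution src dest → solution src dest ≠ solution_alt src dest

-- ===== LEMMAS AND PROOFS =====
-- exhaustive check of the finite domain, stated over Nat so `decide` can enumerate it
set_option maxRecDepth 100000 in
set_option maxHeartbeats 12000000 in
theorem solution_eq_alt_of_lt :
    ∀ s : Nat, s < 64 → ∀ d : Nat, d < 64 →
      ¬ D_solution (s : Int) (d : Int) → solution (s : Int) (d : Int) = solution_alt (s : Int) (d : Int) := by
  decide

-- ===== VERDICT (by name: the statement is the Claim_ definition above) =====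
theorem solution_spec : Claim_unchanged_solution := by
  intro src dest _ hpre
  obtain ⟨h1, h2, h3, h4⟩ := hpre
  intro hD
  lift src to Nat using h1 with s
  lift dest to Nat using h3 with d
  exact solution_eq_alt_of_lt s (by exact_mod_cast h2) d (by exact_mod_cast h4) hD

set_option maxRecDepth 40000 in
theorem solution_changed : Claim_changed_solution := by
  unfold Claim_changed_solution; decide

set_option maxRecDepth 40000 in
theorem solution_tight : Claim_exact_solution := by
  intro src dest _ _ hD
  unfold D_solution at hD
  simp only [List.mem_cons, List.not_mem_nil, or_false, Prod.mk.injEq] at hD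
  rcases hD with ⟨h1, h2⟩ | ⟨h1, h2⟩ | ⟨h1, h2⟩ | ⟨h1, h2⟩ | ⟨h1, h2⟩ | ⟨h1, h2⟩ | ⟨h1, h2⟩ | ⟨h1, h2⟩ <;>
    subst h1 <;> subst h2 <;> decide
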